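-- pv_equiv track=rewrite | github.com/hongjunland/codingTest | 2022/week19/Programmers_43238.py | solution
-- ===== SOURCE A (Python) =====
-- def solution(n, times):
--     left = 1
--     right = n * max(times)
--     answer = 0
--     while left <= right:
--         mid = (left + right)//2
--         result = 0
--         for item in times:
--             result += mid // item
--         if result >= n:
--             right = mid - 1
--             answer = mid
--         else:
--             left = mid + 1
--     return answer
-- ===== SOURCE B (Python) =====
-- def solution(n, times):
--     # Group equal worker times once; each binary-search probe sums over the
--     # distinct values with their multiplicities.
--     groups = {}
--     for t in times:
--         groups[t] = groups.get(t, 0) + 1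
--     pairs = list(groups.items())
--
--     def search(lo, hi, best):
--         if lo > hi:
--             return best
--         mid = (lo + hi) // 2
--         if sum(c * (mid // v) for v, c in pairs) >= n:
--             return search(lo, mid - 1, mid)
--         return search(mid + 1, hi, best)
--
--     return search(1, n * max(times), 0)
-- ===== Notes on version B (the rewrite author's own statement) =====
-- stated objective: alternative
-- what changed: B groups equal worker times into a count dictionary built once and runs a recursive binary search whose probe sums count*(mid//value) over the distinct values, instead of A's iterative search that re-scans the whole list at every probe.
import Mathlib
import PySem

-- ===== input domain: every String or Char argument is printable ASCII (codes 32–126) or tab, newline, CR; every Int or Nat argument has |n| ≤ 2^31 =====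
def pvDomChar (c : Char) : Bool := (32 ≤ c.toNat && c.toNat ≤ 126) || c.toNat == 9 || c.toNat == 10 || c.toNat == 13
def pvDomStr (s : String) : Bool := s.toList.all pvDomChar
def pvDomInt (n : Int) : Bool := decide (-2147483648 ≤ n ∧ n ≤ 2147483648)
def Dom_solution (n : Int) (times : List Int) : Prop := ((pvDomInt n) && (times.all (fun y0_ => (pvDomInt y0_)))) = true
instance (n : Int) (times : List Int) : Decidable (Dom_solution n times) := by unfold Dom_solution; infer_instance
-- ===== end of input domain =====

-- B groups equal worker times into a count dictionary built once and runs a recursive binary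
-- search whose probe sums count*(mid//value) over the distinct values; same return value as A.

-- ===== PORT A =====
-- A's while-loop: state (left, right, answer); terminates because the interval shrinks.
def solLoop (n : Int) (times : List Int) (left right answer : Int) : Int :=
  if h : left ≤ right then
    let mid := PySem.Int.floordiv (left + right) 2
    let result := times.foldl (fun acc item => acc + PySem.Int.floordiv mid item) 0
    if result ≥ n then solLoop n times left (mid - 1) mid
    else solLoop n times (mid + 1) right answer
  else answer
termination_by (right + 1 - left).toNat
decreasing_by
  · have hb := PySem.Int.floordiv_two_mid_bounds h
    omega
  · have hb := PySem.Int.floordiv_two_mid_bounds h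
    omega

def solution (n : Int) (times : List Int) : Int :=
  match PySem.List.max? times (fun x => x) with
  | none => 0          -- Python raises ValueError on max([]); excluded by Pre_solution
  | some m => solLoop n times 1 (n * m) 0

-- ===== PORT B =====
-- sum(c * (mid // v) for v, c in pairs)
def altServed (pairs : List (Int × Int)) (t : Int) : Int :=
  (pairs.map (fun p => p.2 * PySem.Int.floordiv t p.1)).sum

-- B's recursive binary search
def altSearch (pairs : List (Int × Int)) (n lo hi best : Int) : Int :=
  if h : lo > hi then best
  else
    let mid := PySem.Int.floordiv (lo + hi) 2
    if altServed pairs mid ≥ n then altSearch pairs n lo (mid - 1) mid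
    else altSearch pairs n (mid + 1) hi best
termination_by (hi + 1 - lo).toNat
decreasing_by
  · have hb := PySem.Int.floordiv_two_mid_bounds (show lo ≤ hi by omega)
    omega
  · have hb := PySem.Int.floordiv_two_mid_bounds (show lo ≤ hi by omega)
    omega

def solution_alt (n : Int) (times : List Int) : Int :=
  match PySem.List.max? times (fun x => x) with
  | none => 0          -- Python raises ValueError on max([]); excluded by Pre_solution
  | some m =>
      altSearch (times.foldl (fun d t => d.insert t (d.getD t 0 + 1)) PySem.Dict.empty).items
        n 1 (n * m) 0

-- ===== PRECONDITION & SPEC =====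
-- Pre_ excludes exactly the inputs where Python A raises: the empty list (ValueError from max),
-- and 0 ∈ times when the search loop actually runs, i.e. n ≥ 1 and some time is ≥ 1
-- (ZeroDivisionError from mid // 0). B raises the same exceptions there.
def Pre_solution (n : Int) (times : List Int) : Prop :=
  times ≠ [] ∧ ((0 : Int) ∈ times → ¬(1 ≤ n ∧ ∃ x ∈ times, 1 ≤ x))
instance (n : Int) (times : List Int) : Decidable (Pre_solution n times) := by
  unfold Pre_solution; infer_instance

def pvWitness_solution : Int × List Int := (6, [7, 10])

def Spec_solution (n : Int) (times : List Int) (out : Int) : Prop := out = solution_alt n times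
instance (n : Int) (times : List Int) (out : Int) : Decidable (Spec_solution n times out) := by
  unfold Spec_solution; infer_instance

-- ===== CLAIM (what is proved, stated in full; the proofs are below) =====
def Claim_equal_solution : Prop := ∀ (n : Int) (times : List Int), Dom_solution n times → Pre_solution n times → Spec_solution n times (solution n times)

-- ===== LEMMAS AND PROOFS =====

-- if exactly one element of a nodup list equals x, summing an 'if k = x' picks f x
theorem pv_sum_if_eq (ks : List Int) (x : Int) (f : Int → Int)
    (hnd : ks.Nodup) (hx : x ∈ ks) :
    (ks.map (fun k => if k = x then f k else 0)).sum = f x := by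
  induction ks with
  | nil => cases hx
  | cons a t ih =>
    rcases List.nodup_cons.mp hnd with ⟨hna, hndt⟩
    simp only [List.map_cons, List.sum_cons]
    rcases List.mem_cons.mp hx with rfl | h
    · have hz : (t.map (fun k => if k = x then f k else 0)).sum = 0 := by
        apply List.sum_eq_zero
        intro y hy
        rcases List.mem_map.mp hy with ⟨k, hk, rfl⟩
        have hkx : k ≠ x := by rintro rfl; exact hna hk
        simp [hkx]
      simp [hz]
    · have hax : a ≠ x := by rintro rfl; exact hna h
      simp [hax, ih hndt h]

-- summing count(k) * f k over the distinct values of xs equals summing f over xs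
theorem pv_sum_count_mul (xs : List Int) (ks : List Int) (f : Int → Int)
    (hnd : ks.Nodup) (hsub : ∀ x ∈ xs, x ∈ ks) :
    (ks.map (fun k => (xs.count k : Int) * f k)).sum = (xs.map f).sum := by
  induction xs with
  | nil => simp
  | cons x rest ih =>
    have hterm : ∀ k : Int, ((x :: rest).count k : Int) * f k
        = (rest.count k : Int) * f k + (if k = x then f k else 0) := by
      intro k
      by_cases hkx : k = x
      · subst hkx
        rw [List.count_cons_self]
        push_cast
        ring_nf
        simp
      · have hxk : x ≠ k := fun e => hkx e.symm
        simp [hkx, hxk]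
    calc (ks.map (fun k => ((x :: rest).count k : Int) * f k)).sum
        = (ks.map (fun k => (rest.count k : Int) * f k
            + (if k = x then f k else 0))).sum := by
          congr 1; exact List.map_congr_left (fun k _ => hterm k)
      _ = (ks.map (fun k => (rest.count k : Int) * f k)).sum
            + (ks.map (fun k => if k = x then f k else 0)).sum := by
          rw [← List.sum_map_add]
      _ = (rest.map f).sum + f x := by
          rw [ih (fun y hy => hsub y (List.mem_cons_of_mem _ hy)),
              pv_sum_if_eq ks x f hnd (hsub x (List.mem_cons_self))]
      _ = ((x :: rest).map f).sum := by
          rw [List.map_cons, List.sum_cons]; ring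

-- B's probe over the counter's items computes exactly A's per-element sum
theorem pv_served_eq (times : List Int) (t : Int) :
    altServed (PySem.Dict.counter times).items t
      = times.foldl (fun acc item => acc + PySem.Int.floordiv t item) 0 := by
  rw [PySem.List.foldl_add (g := fun item => PySem.Int.floordiv t item)]
  simp only [altServed, PySem.Dict.items_counter, List.map_map, zero_add]
  exact pv_sum_count_mul times (PySem.Set.ofList times)
    (fun v => PySem.Int.floordiv t v) (PySem.Set.nodup_ofList times)
    (fun x hx => (PySem.Set.mem_ofList times x).mpr hx)

-- the two binary searches step identically (fuel = interval width)
theorem pv_loop_eq (n : Int) (times : List Int) :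
    ∀ (k : Nat) (lo hi best : Int), (hi + 1 - lo).toNat ≤ k →
      altSearch (PySem.Dict.counter times).items n lo hi best = solLoop n times lo hi best := by
  intro k
  induction k with
  | zero =>
    intro lo hi best hk
    have hgt : lo > hi := by omega
    rw [altSearch, solLoop, dif_pos hgt, dif_neg (not_le.mpr hgt)]
  | succ k ih =>
    intro lo hi best hk
    by_cases hle : lo ≤ hi
    · obtain ⟨h1, h2⟩ := PySem.Int.floordiv_two_mid_bounds hle
      rw [altSearch, solLoop, dif_neg (not_lt.mpr hle), dif_pos hle]
      simp only [pv_served_eq times]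
      by_cases hc : times.foldl
          (fun acc item => acc + PySem.Int.floordiv (PySem.Int.floordiv (lo + hi) 2) item) 0 ≥ n
      · rw [if_pos hc, if_pos hc]
        exact ih lo (PySem.Int.floordiv (lo + hi) 2 - 1) (PySem.Int.floordiv (lo + hi) 2)
          (by omega)
      · rw [if_neg hc, if_neg hc]
        exact ih (PySem.Int.floordiv (lo + hi) 2 + 1) hi best (by omega)
    · have hgt : lo > hi := not_le.mp hle
      rw [altSearch, solLoop, dif_pos hgt, dif_neg (not_le.mpr hgt)]

-- ===== VERDICT (by name: the statement is the Claim_ definition above) =====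
theorem solution_spec : Claim_equal_solution := by
  intro n times _ _
  unfold Spec_solution solution solution_alt
  rw [PySem.Dict.foldl_insert_getD_add_one_eq_counter]
  cases PySem.List.max? times (fun x => x) with
  | none => rfl
  | some m => exact (pv_loop_eq n times (n * m).toNat 1 (n * m) 0 (by omega)).symm
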